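-- pv_equiv track=rewrite | github.com/rcohngru/advent-of-code | 2024/day-12/part2.py | parse_vertical
-- ===== SOURCE A (Python) =====
-- def parse_vertical(nodes):
--     nodes = sorted(nodes, key = lambda tup: (tup[1], tup[0]))
--     sides = 1
--     for i in range(1, len(nodes)):
--         curr = nodes[i]
--         prior = nodes[i - 1]
--         if curr[1] != prior[1]:
--           sides += 1
--           continue
--         if curr[0] - prior[0] > 1:
--             sides += 1
--             continue
--
--     return sides
-- ===== SOURCE B (Python) =====
-- def parse_vertical(nodes):
--     # Count run-starts directly: a distinct node (r, c) begins a vertical run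
--     # iff (r - 1, c) is absent; no sorting needed.
--     distinct = set(nodes)
--     sides = 0
--     for (r, c) in distinct:
--         if (r - 1, c) not in distinct:
--             sides += 1
--     return sides
-- ===== Notes on version B (the rewrite author's own statement) =====
-- stated objective: alternative
-- what changed: Instead of sorting by (col,row) and scanning adjacent pairs for column changes and row gaps, B puts the distinct nodes in a hash set and counts the nodes (r,c) whose upper neighbour (r-1,c) is absent, i.e. the run starts, with no sorting at all.
-- intended difference: On the empty list A returns 1 (an artefact of initializing sides=1 before the loop) while B returns 0, the intended number of sides of an empty region. — e.g. on parse_vertical([]): A returns 1, B returns 0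
import Mathlib
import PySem

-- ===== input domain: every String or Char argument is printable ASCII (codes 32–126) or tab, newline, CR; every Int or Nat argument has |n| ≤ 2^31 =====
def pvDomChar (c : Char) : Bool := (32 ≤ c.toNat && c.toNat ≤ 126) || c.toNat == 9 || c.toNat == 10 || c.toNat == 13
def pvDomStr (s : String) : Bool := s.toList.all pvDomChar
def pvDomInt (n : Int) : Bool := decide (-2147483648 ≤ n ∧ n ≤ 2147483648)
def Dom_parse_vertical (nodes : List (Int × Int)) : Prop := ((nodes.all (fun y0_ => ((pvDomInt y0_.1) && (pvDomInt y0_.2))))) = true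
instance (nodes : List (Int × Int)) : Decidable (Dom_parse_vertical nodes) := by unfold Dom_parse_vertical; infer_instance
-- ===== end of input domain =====

-- B replaces A's sort-then-scan with a hash-set count of run starts ((r-1,c) absent); B returns 0 (not A's 1) on the empty list.

-- ===== PORT A =====
def parse_vertical (nodes : List (Int × Int)) : Int :=
  let ns := PySem.List.sorted2 nodes (fun t => t.2) (fun t => t.1)
  (PySem.List.pyRange 1 (ns.length : Int) 1).foldl
    (fun sides i =>
      let curr := PySem.List.pyGetD ns i ((0 : Int), (0 : Int))
      let prior := PySem.List.pyGetD ns (i - 1) ((0 : Int), (0 : Int))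
      if curr.2 ≠ prior.2 then sides + 1
      else if curr.1 - prior.1 > 1 then sides + 1
      else sides) 1

-- ===== PORT B =====
def parse_vertical_alt (nodes : List (Int × Int)) : Int :=
  let distinct := PySem.Set.ofList nodes
  distinct.foldl
    (fun sides t =>
      if !(PySem.Set.contains distinct (t.1 - 1, t.2)) then sides + 1 else sides) 0

-- ===== PRECONDITION & SPEC =====
-- On the empty list A returns 1 (an artefact of initializing sides = 1 before the loop); B returns 0, the intended count of sides for no nodes.
def D_parse_vertical (nodes : List (Int × Int)) : Prop := nodes = []
instance (nodes : List (Int × Int)) : Decidable (D_parse_vertical nodes) := by unfold D_parse_vertical; infer_instance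

def Spec_parse_vertical (nodes : List (Int × Int)) (out : Int) : Prop := ¬ D_parse_vertical nodes → out = parse_vertical_alt nodes
instance (nodes : List (Int × Int)) (out : Int) : Decidable (Spec_parse_vertical nodes out) := by unfold Spec_parse_vertical; infer_instance

def pvDiffWitness_parse_vertical : (List (Int × Int)) := []
def pvDiffWitnessOut_parse_vertical : Int × Int := (1, 0)

-- ===== CLAIM (what is proved, stated in full; the proofs are below) =====
def Claim_unchanged_parse_vertical : Prop := ∀ (nodes : List (Int × Int)), Dom_parse_vertical nodes → Spec_parse_vertical nodes (parse_vertical nodes)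
def Claim_changed_parse_vertical : Prop := Dom_parse_vertical (pvDiffWitness_parse_vertical) ∧ D_parse_vertical (pvDiffWitness_parse_vertical) ∧ parse_vertical (pvDiffWitness_parse_vertical) = pvDiffWitnessOut_parse_vertical.1 ∧ parse_vertical_alt (pvDiffWitness_parse_vertical) = pvDiffWitnessOut_parse_vertical.2 ∧ pvDiffWitnessOut_parse_vertical.1 ≠ pvDiffWitnessOut_parse_vertical.2
def Claim_exact_parse_vertical : Prop := ∀ (nodes : List (Int × Int)), Dom_parse_vertical nodes → D_parse_vertical nodes → parse_vertical nodes ≠ parse_vertical_alt nodes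

-- ===== LEMMAS AND PROOFS =====

-- the lexicographic sort key A uses: (column, row)
def pvKey (t : Int × Int) : Lex (Int × Int) := toLex (t.2, t.1)

-- non-strict / strict key order, spelled out on the components
def pvKeyLe (a b : Int × Int) : Prop := a.2 < b.2 ∨ (a.2 = b.2 ∧ a.1 ≤ b.1)
def pvKeyLt (a b : Int × Int) : Prop := a.2 < b.2 ∨ (a.2 = b.2 ∧ a.1 < b.1)

-- the per-pair contribution of A's loop body and its total over adjacent pairs
def pvBrk (p q : Int × Int) : Int := if q.2 ≠ p.2 then 1 else if q.1 - p.1 > 1 then 1 else 0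

def pvBreaks : List (Int × Int) → Int
  | p :: q :: t => pvBrk p q + pvBreaks (q :: t)
  | _ => 0

-- remove adjacent duplicates (in a key-sorted list: all duplicates)
def pvSqueeze : List (Int × Int) → List (Int × Int)
  | [] => []
  | [x] => [x]
  | x :: y :: t => if x = y then pvSqueeze (y :: t) else x :: pvSqueeze (y :: t)

-- "z starts a vertical run w.r.t. member list m"
def pvStart (m : List (Int × Int)) (z : Int × Int) : Bool := decide (¬ ((z.1 - 1, z.2) ∈ m))

theorem pv_sorted2_eq : ∀ (nodes : List (Int × Int)),
    PySem.List.sorted2 nodes (fun t => t.2) (fun t => t.1) = PySem.List.sorted nodes pvKey := by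
  intro nodes
  simp only [PySem.List.sorted2, PySem.List.sorted]
  have h : (fun (a b : Int × Int) => decide (a.2 < b.2) || (!decide (b.2 < a.2) && decide (a.1 < b.1)))
      = fun a b => decide (pvKey a < pvKey b) := by
    funext a b
    by_cases h1 : a.2 < b.2 <;> by_cases h2 : b.2 < a.2 <;> by_cases h3 : a.1 < b.1 <;>
      simp [pvKey, Prod.Lex.toLex_lt_toLex, h1, h2, h3] <;> omega
  simp only [if_neg (by decide : ¬ (false = true))]
  rw [h]

theorem pv_squeeze_mem : ∀ (l : List (Int × Int)) (z : Int × Int), z ∈ pvSqueeze l ↔ z ∈ l := by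
  intro l
  match l with
  | [] => intro z; simp [pvSqueeze]
  | [x] => intro z; simp [pvSqueeze]
  | x :: y :: t =>
    intro z
    have ih := pv_squeeze_mem (y :: t) z
    by_cases hxy : x = y
    · subst hxy
      rw [show pvSqueeze (x::x::t) = pvSqueeze (x::t) by simp [pvSqueeze]]
      rw [ih]
      simp
    · simp only [pvSqueeze, if_neg hxy, List.mem_cons] at *
      rw [ih]

theorem pv_squeeze_head : ∀ (x : Int × Int) (t : List (Int × Int)), (pvSqueeze (x :: t)).head? = some x := by
  intro x t
  induction t generalizing x with
  | nil => simp [pvSqueeze]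
  | cons y t ih =>
    by_cases hxy : x = y
    · subst hxy
      rw [show pvSqueeze (x::x::t) = pvSqueeze (x::t) by simp [pvSqueeze]]
      exact ih x
    · simp [pvSqueeze, if_neg hxy]

theorem pv_squeeze_breaks : ∀ (l : List (Int × Int)), pvBreaks (pvSqueeze l) = pvBreaks l := by
  intro l
  match l with
  | [] => rfl
  | [x] => rfl
  | x :: y :: t =>
    have ih := pv_squeeze_breaks (y :: t)
    by_cases hxy : x = y
    · subst hxy
      rw [show pvSqueeze (x::x::t) = pvSqueeze (x::t) by simp [pvSqueeze]]
      rw [ih]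
      have h0 : pvBrk x x = 0 := by simp [pvBrk]
      show pvBreaks (x :: t) = pvBreaks (x :: x :: t)
      rw [show pvBreaks (x :: x :: t) = pvBrk x x + pvBreaks (x :: t) from rfl, h0, zero_add]
    · simp only [pvSqueeze, if_neg hxy]
      obtain ⟨t', ht'⟩ : ∃ t', pvSqueeze (y :: t) = y :: t' := by
        have h := pv_squeeze_head y t
        cases hsq : pvSqueeze (y :: t) with
        | nil => rw [hsq] at h; simp at h
        | cons a s => rw [hsq] at h; simp at h; exact ⟨s, by rw [h]⟩
      rw [ht']
      show pvBrk x y + pvBreaks (y :: t') = pvBreaks (x :: y :: t)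
      rw [← ht', ih]
      rfl

theorem pv_keyLe_antisymm : ∀ (a b : Int × Int), pvKeyLe a b → pvKeyLe b a → a = b := by
  intro a b h1 h2
  unfold pvKeyLe at h1 h2
  have : a.1 = b.1 ∧ a.2 = b.2 := by omega
  exact Prod.ext this.1 this.2

theorem pv_le_ne_lt : ∀ (a b : Int × Int), pvKeyLe a b → a ≠ b → pvKeyLt a b := by
  intro a b h hne
  unfold pvKeyLe at h; unfold pvKeyLt
  rcases h with h | ⟨h2, h1⟩
  · exact Or.inl h
  · rcases lt_or_eq_of_le h1 with h1' | h1'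
    · exact Or.inr ⟨h2, h1'⟩
    · exact absurd (Prod.ext h1' h2) hne

theorem pv_squeeze_pairwise : ∀ (l : List (Int × Int)), l.Pairwise pvKeyLe → (pvSqueeze l).Pairwise pvKeyLt := by
  intro l
  match l with
  | [] => intro _; simp [pvSqueeze]
  | [x] => intro _; simp [pvSqueeze]
  | x :: y :: t =>
    intro hp
    have hp' : (y :: t).Pairwise pvKeyLe := hp.tail
    have ih := pv_squeeze_pairwise (y :: t) hp'
    have hxle : ∀ z ∈ y :: t, pvKeyLe x z := fun z hz => (List.pairwise_cons.mp hp).1 z hz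
    by_cases hxy : x = y
    · subst hxy
      rw [show pvSqueeze (x::x::t) = pvSqueeze (x::t) by simp [pvSqueeze]]
      exact ih
    · rw [show pvSqueeze (x::y::t) = x :: pvSqueeze (y::t) by simp [pvSqueeze, hxy]]
      refine List.pairwise_cons.mpr ⟨?_, ih⟩
      intro z hz
      have hzmem : z ∈ y :: t := (pv_squeeze_mem (y :: t) z).mp hz
      refine pv_le_ne_lt x z (hxle z hzmem) ?_
      intro hzx
      subst hzx
      rcases List.mem_cons.mp hzmem with h | h
      · exact hxy h
      · have h1 : pvKeyLe x y := hxle y (List.mem_cons_self)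
        have h2 : pvKeyLe y x := (List.pairwise_cons.mp hp').1 x h
        exact hxy (pv_keyLe_antisymm x y h1 h2)

-- main counting lemma: on a strictly key-sorted nonempty list, run starts = 1 + breaks
theorem pv_main : ∀ (l : List (Int × Int)), l.Pairwise pvKeyLt → l ≠ [] →
    (l.countP (pvStart l) : Int) = 1 + pvBreaks l := by
  intro l
  match l with
  | [] => intro _ h; exact absurd rfl h
  | [x] =>
    intro _ _
    have hx : pvStart [x] x = true := by
      simp only [pvStart, List.mem_singleton, decide_eq_true_eq]
      intro h
      rw [Prod.ext_iff] at h
      omega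
    simp [List.countP, List.countP.go, hx, pvBreaks]
  | x :: y :: t =>
    intro hp _
    have hrest : (y :: t).Pairwise pvKeyLt := hp.tail
    have hxlt : ∀ z ∈ y :: t, pvKeyLt x z := fun z hz => (List.pairwise_cons.mp hp).1 z hz
    have ih := pv_main (y :: t) hrest (by simp)
    -- F1 : the head's upper neighbour is absent from the whole list
    have F1 : pvStart (x :: y :: t) x = true := by
      simp only [pvStart, decide_eq_true_eq]
      intro hmem
      rcases List.mem_cons.mp hmem with h | h
      · rw [Prod.ext_iff] at h; omega
      · have := hxlt _ h
        unfold pvKeyLt at this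
        simp at this
        omega
    -- F2 : no element of t has x as its upper neighbour
    have F2 : ∀ z ∈ t, (z.1 - 1, z.2) ≠ x := by
      intro z hz hc
      have hyz : pvKeyLt y z := (List.pairwise_cons.mp hrest).1 z hz
      have hxy : pvKeyLt x y := hxlt y List.mem_cons_self
      have hz1 : z.1 - 1 = x.1 := by have := congrArg Prod.fst hc; simpa using this
      have hz2 : z.2 = x.2 := by have := congrArg Prod.snd hc; simpa using this
      unfold pvKeyLt at hyz hxy
      omega
    -- membership congruence on t
    have hcong : ∀ z ∈ t, pvStart (x :: y :: t) z = pvStart (y :: t) z := by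
      intro z hz
      simp only [pvStart, List.mem_cons]
      have := F2 z hz
      simp [this]
    have hxy : pvKeyLt x y := hxlt y List.mem_cons_self
    by_cases hbrk : y.2 ≠ x.2 ∨ y.1 - x.1 > 1
    · -- break between x and y
      have hbval : pvBrk x y = 1 := by unfold pvBrk; split_ifs <;> tauto
      have F4 : (y.1 - 1, y.2) ≠ x := by
        intro h; rw [Prod.ext_iff] at h; simp at h; omega
      have hcong2 : ∀ z ∈ y :: t, pvStart (x :: y :: t) z = pvStart (y :: t) z := by
        intro z hz
        rcases List.mem_cons.mp hz with h | h
        · subst h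
          simp only [pvStart, List.mem_cons]
          simp [F4]
        · exact hcong z h
      have hc : List.countP (pvStart (x :: y :: t)) (y :: t) = List.countP (pvStart (y :: t)) (y :: t) :=
        List.countP_congr (fun z hz => by rw [hcong2 z hz])
      have hcount : List.countP (pvStart (x :: y :: t)) (x :: y :: t)
          = List.countP (pvStart (x :: y :: t)) (y :: t) + 1 := by
        simp [List.countP_cons, F1]
      have hbr : pvBreaks (x :: y :: t) = 1 + pvBreaks (y :: t) := by
        rw [show pvBreaks (x :: y :: t) = pvBrk x y + pvBreaks (y :: t) from rfl, hbval]
      rw [hcount, hc, hbr]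
      push_cast
      omega
    · -- no break: y.2 = x.2 and y.1 = x.1 + 1
      have hxy' : x.2 = y.2 ∧ x.1 < y.1 := by
        unfold pvKeyLt at hxy; omega
      have hy1 : y.1 = x.1 + 1 := by omega
      have hyx : (y.1 - 1, y.2) = x := by
        rw [Prod.ext_iff]; constructor <;> simp <;> omega
      have hxnotrest : x ∉ y :: t := by
        intro h
        have := hxlt x h
        unfold pvKeyLt at this
        omega
      have hyfalse : pvStart (x :: y :: t) y = false := by
        simp only [pvStart, List.mem_cons, decide_eq_false_iff_not]
        push Not
        exact Or.inl hyx
      have hytrue : pvStart (y :: t) y = true := by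
        simp only [pvStart, decide_eq_true_eq]
        rw [hyx]
        exact hxnotrest
      have hct : List.countP (pvStart (x :: y :: t)) t = List.countP (pvStart (y :: t)) t :=
        List.countP_congr (fun z hz => by rw [hcong z hz])
      have hbval : pvBrk x y = 0 := by unfold pvBrk; split_ifs <;> tauto
      have hbr : pvBreaks (x :: y :: t) = pvBreaks (y :: t) := by
        rw [show pvBreaks (x :: y :: t) = pvBrk x y + pvBreaks (y :: t) from rfl, hbval]; ring
      have e1 : List.countP (pvStart (x :: y :: t)) (x :: y :: t)
          = List.countP (pvStart (x :: y :: t)) t + 1 := by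
        simp [F1, hyfalse]
      have e2 : List.countP (pvStart (y :: t)) (y :: t) = List.countP (pvStart (y :: t)) t + 1 := by
        simp [hytrue]
      rw [e1, hct, hbr]
      rw [e2] at ih
      push_cast
      push_cast at ih
      omega

theorem pv_sumIdx : ∀ (l : List (Int × Int)) (d : Int × Int),
    ((List.range (l.length - 1)).map (fun k => pvBrk (l.getD k d) (l.getD (k+1) d))).sum = pvBreaks l := by
  intro l d
  match l with
  | [] => rfl
  | [x] => rfl
  | x :: y :: t =>
    have ih := pv_sumIdx (y :: t) d
    have hlen : (x :: y :: t).length - 1 = (t.length + 1) := by simp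
    rw [hlen, List.range_succ_eq_map, List.map_cons, List.map_map, List.sum_cons]
    have h0 : pvBrk ((x :: y :: t).getD 0 d) ((x :: y :: t).getD 1 d) = pvBrk x y := rfl
    have h1 : ((List.range t.length).map ((fun k => pvBrk ((x :: y :: t).getD k d) ((x :: y :: t).getD (k+1) d)) ∘ Nat.succ)).sum
        = ((List.range ((y :: t).length - 1)).map (fun k => pvBrk ((y :: t).getD k d) ((y :: t).getD (k+1) d))).sum := by
      have : (y :: t).length - 1 = t.length := by simp
      rw [this]
      exact congrArg List.sum (List.map_congr_left (fun k hk => rfl))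
    rw [h0, h1, ih]
    rfl

-- A's index loop equals 1 + pvBreaks of the scanned list
theorem pv_loopA : ∀ (l : List (Int × Int)),
    (PySem.List.pyRange 1 (l.length : Int) 1).foldl
      (fun sides i =>
        let curr := PySem.List.pyGetD l i ((0 : Int), (0 : Int))
        let prior := PySem.List.pyGetD l (i - 1) ((0 : Int), (0 : Int))
        if curr.2 ≠ prior.2 then sides + 1
        else if curr.1 - prior.1 > 1 then sides + 1
        else sides) 1 = 1 + pvBreaks l := by
  intro l
  have hfun : (fun (sides : Int) (i : Int) =>
        let curr := PySem.List.pyGetD l i ((0 : Int), (0 : Int))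
        let prior := PySem.List.pyGetD l (i - 1) ((0 : Int), (0 : Int))
        if curr.2 ≠ prior.2 then sides + 1
        else if curr.1 - prior.1 > 1 then sides + 1
        else sides)
      = fun sides i => sides + pvBrk (PySem.List.pyGetD l (i - 1) ((0 : Int), (0 : Int))) (PySem.List.pyGetD l i ((0 : Int), (0 : Int))) := by
    funext sides i
    simp only [pvBrk]
    split_ifs <;> omega
  rw [hfun, PySem.List.foldl_add]
  congr 1
  rw [PySem.List.pyRange_one, List.map_map]
  have hn : ((l.length : Int) - 1).toNat = l.length - 1 := by omega
  rw [hn]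
  rw [← pv_sumIdx l ((0 : Int), (0 : Int))]
  apply congrArg List.sum
  apply List.map_congr_left
  intro k hk
  simp only [Function.comp]
  have e1 : (1 : Int) + (k : Int) - 1 = ((k : Nat) : Int) := by omega
  have e2 : (1 : Int) + (k : Int) = (((k + 1 : Nat)) : Int) := by omega
  rw [e1, e2, PySem.List.pyGetD_natCast, PySem.List.pyGetD_natCast]

theorem pv_altB : ∀ (nodes : List (Int × Int)),
    parse_vertical_alt nodes = ((PySem.Set.ofList nodes).countP (pvStart nodes) : Int) := by
  intro nodes
  show (PySem.Set.ofList nodes).foldl _ 0 = _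
  rw [PySem.List.foldl_if_add_one]
  rw [zero_add]
  congr 1
  apply List.countP_congr
  intro z hz
  simp only [pvStart]
  rw [show (PySem.Set.contains (PySem.Set.ofList nodes) (z.1 - 1, z.2)) = decide ((z.1 - 1, z.2) ∈ nodes) by
    by_cases h : (z.1 - 1, z.2) ∈ nodes
    · simp [PySem.Set.mem_ofList, h]
    · simp [PySem.Set.mem_ofList, h]]
  simp

theorem pv_keyLt_ne : ∀ (a b : Int × Int), pvKeyLt a b → a ≠ b := by
  intro a b h he
  subst he
  unfold pvKeyLt at h
  omega

theorem pv_nonempty_eq : ∀ (nodes : List (Int × Int)), nodes ≠ [] →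
    parse_vertical nodes = parse_vertical_alt nodes := by
  intro nodes hne
  have hA : parse_vertical nodes = 1 + pvBreaks (PySem.List.sorted nodes pvKey) := by
    show (PySem.List.pyRange 1 ((PySem.List.sorted2 nodes (fun t => t.2) (fun t => t.1)).length : Int) 1).foldl _ 1 = _
    rw [pv_sorted2_eq]
    exact pv_loopA (PySem.List.sorted nodes pvKey)
  set s := PySem.List.sorted nodes pvKey with hs
  have hsle : s.Pairwise pvKeyLe := by
    have h := PySem.List.sorted_pairwise nodes pvKey
    refine h.imp ?_
    intro a b hab
    have : toLex (a.2, a.1) ≤ toLex (b.2, b.1) := hab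
    rw [Prod.Lex.toLex_le_toLex] at this
    unfold pvKeyLe
    simpa using this
  set q := pvSqueeze s with hq
  have hqlt : q.Pairwise pvKeyLt := pv_squeeze_pairwise s hsle
  have hqnodup : q.Nodup := hqlt.imp (fun h => pv_keyLt_ne _ _ h)
  have hsne : s ≠ [] := by
    rw [hs]
    intro h
    exact hne ((PySem.List.sorted_eq_nil_iff nodes pvKey false).mp h)
  have hqne : q ≠ [] := by
    obtain ⟨a, t, hat⟩ := List.exists_cons_of_ne_nil hsne
    rw [hq, hat]
    intro h
    have := pv_squeeze_head a t
    rw [h] at this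
    simp at this
  have hmem : ∀ z : Int × Int, z ∈ q ↔ z ∈ nodes := by
    intro z
    rw [hq, pv_squeeze_mem, hs, PySem.List.mem_sorted]
  have hmain : (q.countP (pvStart q) : Int) = 1 + pvBreaks q := pv_main q hqlt hqne
  have hcong : q.countP (pvStart q) = q.countP (pvStart nodes) :=
    List.countP_congr (fun z hz => by simp only [pvStart, hmem])
  have hperm : (PySem.Set.ofList nodes).Perm q := by
    rw [List.perm_ext_iff_of_nodup (PySem.Set.nodup_ofList nodes) hqnodup]
    intro a
    rw [PySem.Set.mem_ofList, hmem]
  have hcount : (PySem.Set.ofList nodes).countP (pvStart nodes) = q.countP (pvStart nodes) :=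
    hperm.countP_eq _
  rw [hA, pv_altB, hcount, ← hcong, hmain, hq, pv_squeeze_breaks]

-- ===== VERDICT (by name: the statement is the Claim_ definition above) =====
theorem parse_vertical_spec : Claim_unchanged_parse_vertical := by
  intro nodes _ hnd
  exact pv_nonempty_eq nodes (fun h => hnd h)

theorem parse_vertical_changed : Claim_changed_parse_vertical := by
  unfold Claim_changed_parse_vertical; decide

theorem parse_vertical_tight : Claim_exact_parse_vertical := by
  intro nodes _ hd
  have : nodes = [] := hd
  subst this
  decide
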